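-- pv_equiv track=rewrite | github.com/nuno887/final_version | relation_extractor_02/sumario_I_II_IV/main.py | _split_by_org_headers
-- ===== SOURCE A (Python) =====
-- def _split_by_org_headers(items):
--     """
--     items: dict[int, {"text": str, "label": str}]
--     returns: list[dict[int, {"text", "label"}]]
--     """
--     blocks = []
--     current = {}
--     star_mode = False  # False = Phase 1 (ORG), True = Phase 2 (STAR)
--
--     for i in sorted(items.keys()):
--         label = items[i]["label"]
--
--         if not star_mode:
--             # Phase 1: split by ORG_LABEL, switch to star_mode on first ORG_WITH_STAR_LABEL
--             if label == "ORG_WITH_STAR_LABEL":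
--                 star_mode = True
--                 if current:
--                     blocks.append(current)
--                 current = {i: items[i]}
--             elif label == "ORG_LABEL":
--                 if current:
--                     blocks.append(current)
--                 current = {i: items[i]}
--             else:
--                 current[i] = items[i]
--         else:
--             # Phase 2: split only by ORG_WITH_STAR_LABEL
--             if label == "ORG_WITH_STAR_LABEL":
--                 if current:
--                     blocks.append(current)
--                 current = {i: items[i]}
--             else:
--                 current[i] = items[i]
--
--     if current:
--         blocks.append(current)
--
--     return blocks
-- ===== SOURCE B (Python) =====
-- def _split_by_org_headers(items):
--     """
--     items: dict[int, {"text": str, "label": str}]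
--     returns: list[dict[int, {"text", "label"}]]
--     """
--     ks = sorted(items)
--     stars = [k for k in ks if items[k]["label"] == "ORG_WITH_STAR_LABEL"]
--     first_star = stars[0] if stars else None
--
--     def is_start(k):
--         lab = items[k]["label"]
--         return lab == "ORG_WITH_STAR_LABEL" or (
--             lab == "ORG_LABEL" and (first_star is None or k < first_star))
--
--     def split(rest):
--         if not rest:
--             return []
--         head, tail = rest[0], rest[1:]
--         block = {head: items[head]}
--         while tail and not is_start(tail[0]):
--             block[tail[0]] = items[tail[0]]
--             tail = tail[1:]
--         return [block] + split(tail)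
--
--     return split(ks)
-- ===== Notes on version B (the rewrite author's own statement) =====
-- stated objective: alternative
-- what changed: B drops A's star_mode state machine and current/flush accumulator: it precomputes the first star-labelled key from the sorted keys and recursively slices one block at a time (a while-scan to the next block start), deciding ORG_LABEL splits by comparing each key with that first star key.
import Mathlib
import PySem

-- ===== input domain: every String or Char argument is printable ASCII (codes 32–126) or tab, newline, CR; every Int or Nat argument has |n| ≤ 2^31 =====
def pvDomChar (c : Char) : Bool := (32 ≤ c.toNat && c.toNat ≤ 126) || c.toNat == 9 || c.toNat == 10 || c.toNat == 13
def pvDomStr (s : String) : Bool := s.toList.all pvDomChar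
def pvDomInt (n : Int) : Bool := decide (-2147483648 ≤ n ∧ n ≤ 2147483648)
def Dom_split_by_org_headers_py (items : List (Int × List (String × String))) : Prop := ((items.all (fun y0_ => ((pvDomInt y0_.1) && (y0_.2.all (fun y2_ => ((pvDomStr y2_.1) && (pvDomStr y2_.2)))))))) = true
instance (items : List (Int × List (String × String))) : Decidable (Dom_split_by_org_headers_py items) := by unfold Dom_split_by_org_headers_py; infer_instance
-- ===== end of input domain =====

-- B replaces A's star_mode state machine by precomputing the first star-labelled key and
-- recursively slicing off one block at a time (objective: alternative; same O(n log n) cost).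
-- Equivalence is about the RETURN value; neither program mutates its argument.

-- ===== PORT A =====
-- items[k] on the Python dict (assoc-list lookup, first match — exact under Pre_'s unique keys)
def pvVal (items : List (Int × List (String × String))) (k : Int) : List (String × String) :=
  PySem.Dict.getD (PySem.Dict.mk items) k []

-- items[k]["label"] (exact under Pre_: "label" present, inner keys unique)
def pvLab (items : List (Int × List (String × String))) (k : Int) : String :=
  PySem.Dict.getD (PySem.Dict.mk (pvVal items k)) "label" ""

-- the body of A's for-loop over sorted keys: state = (blocks, current, star_mode)
def pvStepA (items : List (Int × List (String × String)))
    (st : List (List (Int × List (String × String))) × List (Int × List (String × String)) × Bool)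
    (i : Int) : List (List (Int × List (String × String))) × List (Int × List (String × String)) × Bool :=
  let blocks := st.1
  let current := st.2.1
  let star_mode := st.2.2
  let label := pvLab items i
  if star_mode = false then
    if label = "ORG_WITH_STAR_LABEL" then
      ((if current ≠ [] then blocks ++ [current] else blocks), ([(i, pvVal items i)], true))
    else if label = "ORG_LABEL" then
      ((if current ≠ [] then blocks ++ [current] else blocks), ([(i, pvVal items i)], false))
    else (blocks, (current ++ [(i, pvVal items i)], false))
  else
    if label = "ORG_WITH_STAR_LABEL" then
      ((if current ≠ [] then blocks ++ [current] else blocks), ([(i, pvVal items i)], true))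
    else (blocks, (current ++ [(i, pvVal items i)], true))

def split_by_org_headers_py (items : List (Int × List (String × String))) : List (List (Int × List (String × String))) :=
  let ks := PySem.List.sorted (items.map Prod.fst) (fun k => k) false
  let st := ks.foldl (pvStepA items) ([], ([], false))
  if st.2.1 ≠ [] then st.1 ++ [st.2.1] else st.1

-- ===== PORT B =====
-- is_start(k): k begins a new block
def pvIsStart (items : List (Int × List (String × String))) (firstStar : Option Int) (k : Int) : Bool :=
  pvLab items k == "ORG_WITH_STAR_LABEL" ||
    (pvLab items k == "ORG_LABEL" &&
      (match firstStar with | none => true | some s => decide (k < s)))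

-- the while-loop of split: consume keys until the next block start
def pvTakeBlock (p : Int → Bool) : List Int → List Int × List Int
  | [] => ([], [])
  | k :: rest =>
    if p k then ([], k :: rest)
    else ((k :: (pvTakeBlock p rest).1), (pvTakeBlock p rest).2)

theorem pvTakeBlock_snd_length (p : Int → Bool) (l : List Int) :
    (pvTakeBlock p l).2.length ≤ l.length := by
  induction l with
  | nil => simp [pvTakeBlock]
  | cons k rest ih =>
    simp only [pvTakeBlock]
    split
    · simp
    · exact Nat.le_succ_of_le ih

-- split(rest): one block, then recurse on what is left
def pvSplit (items : List (Int × List (String × String))) (firstStar : Option Int) :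
    List Int → List (List (Int × List (String × String)))
  | [] => []
  | k :: rest =>
    ((k :: (pvTakeBlock (pvIsStart items firstStar) rest).1).map (fun j => (j, pvVal items j))) ::
      pvSplit items firstStar (pvTakeBlock (pvIsStart items firstStar) rest).2
termination_by l => l.length
decreasing_by exact Nat.lt_succ_of_le (pvTakeBlock_snd_length _ rest)

def split_by_org_headers_py_alt (items : List (Int × List (String × String))) : List (List (Int × List (String × String))) :=
  let ks := PySem.List.sorted (items.map Prod.fst) (fun k => k) false
  let stars := ks.filter (fun k => pvLab items k == "ORG_WITH_STAR_LABEL")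
  pvSplit items stars.head? ks

-- ===== PRECONDITION & SPEC =====
-- Pre_ excludes association lists with a duplicate key (outer, or inside a value), where the
-- Python-dict representation collapses duplicates and the assoc-list behaviour is accidental,
-- and items whose value has no "label" key, on which A raises KeyError.
def Pre_split_by_org_headers_py (items : List (Int × List (String × String))) : Prop :=
  (items.map Prod.fst).Nodup ∧
    ∀ p ∈ items, (p.2.map Prod.fst).Nodup ∧ "label" ∈ p.2.map Prod.fst
instance (items : List (Int × List (String × String))) : Decidable (Pre_split_by_org_headers_py items) := by
  unfold Pre_split_by_org_headers_py; infer_instance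

def pvWitness_split_by_org_headers_py : (List (Int × List (String × String))) :=
  [(2, [("label", "OTHER"), ("text", "b")]),
   (1, [("label", "ORG_LABEL"), ("text", "a")]),
   (3, [("label", "ORG_WITH_STAR_LABEL"), ("text", "c")])]

def Spec_split_by_org_headers_py (items : List (Int × List (String × String))) (out : List (List (Int × List (String × String)))) : Prop := out = split_by_org_headers_py_alt items
instance (items : List (Int × List (String × String))) (out : List (List (Int × List (String × String)))) : Decidable (Spec_split_by_org_headers_py items out) := by unfold Spec_split_by_org_headers_py; infer_instance

-- ===== CLAIM (what is proved, stated in full; the proofs are below) =====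
def Claim_equal_split_by_org_headers_py : Prop := ∀ (items : List (Int × List (String × String))), Dom_split_by_org_headers_py items → Pre_split_by_org_headers_py items → Spec_split_by_org_headers_py items (split_by_org_headers_py items)

-- ===== LEMMAS AND PROOFS =====

-- A's loop, phrased with the boundary test and the star-flag update made explicit
def pvStartA (items : List (Int × List (String × String))) (star : Bool) (k : Int) : Bool :=
  pvLab items k == "ORG_WITH_STAR_LABEL" || (!star && pvLab items k == "ORG_LABEL")

def pvNewStar (items : List (Int × List (String × String))) (star : Bool) (k : Int) : Bool :=
  star || pvLab items k == "ORG_WITH_STAR_LABEL"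

theorem pvStepA_char (items : List (Int × List (String × String)))
    (blocks : List (List (Int × List (String × String)))) (cur : List (Int × List (String × String)))
    (star : Bool) (i : Int) :
    pvStepA items (blocks, (cur, star)) i =
      if pvStartA items star i then
        ((if cur ≠ [] then blocks ++ [cur] else blocks), ([(i, pvVal items i)], pvNewStar items star i))
      else (blocks, (cur ++ [(i, pvVal items i)], pvNewStar items star i)) := by
  by_cases h1 : pvLab items i = "ORG_WITH_STAR_LABEL" <;>
    by_cases h2 : pvLab items i = "ORG_LABEL" <;>
      cases star <;> simp [pvStepA, pvStartA, pvNewStar, h1, h2]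

-- A's run, as a recursion on the remaining sorted keys
def pvSplitCont (items : List (Int × List (String × String))) (star : Bool)
    (cur : List (Int × List (String × String))) :
    List Int → List (List (Int × List (String × String)))
  | [] => [cur]
  | k :: ks =>
    if pvStartA items star k then
      cur :: pvSplitCont items (pvNewStar items star k) [(k, pvVal items k)] ks
    else pvSplitCont items (pvNewStar items star k) (cur ++ [(k, pvVal items k)]) ks

theorem pvFoldA_char (items : List (Int × List (String × String))) (L : List Int) :
    ∀ (blocks : List (List (Int × List (String × String))))
      (cur : List (Int × List (String × String))) (star : Bool), cur ≠ [] →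
    (let st := L.foldl (pvStepA items) (blocks, (cur, star));
     if st.2.1 ≠ [] then st.1 ++ [st.2.1] else st.1) = blocks ++ pvSplitCont items star cur L := by
  induction L with
  | nil => intro blocks cur star h; simp [pvSplitCont, h]
  | cons k tl ih =>
    intro blocks cur star h
    simp only [List.foldl_cons, pvStepA_char, pvSplitCont]
    by_cases hs : pvStartA items star k = true
    · simp only [hs, if_true, h, ne_eq, not_false_eq_true, ite_true]
      rw [ih (blocks ++ [cur]) [(k, pvVal items k)] (pvNewStar items star k) (by simp)]
      simp
    · simp only [hs, Bool.false_eq_true, if_false, ite_false]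
      rw [ih blocks (cur ++ [(k, pvVal items k)]) (pvNewStar items star k) (by simp)]

-- the star_mode flag, expressed through the first star-labelled key
def pvInv (firstStar : Option Int) (star : Bool) (L : List Int) : Prop :=
  if star then ∃ s, firstStar = some s ∧ ∀ k ∈ L, s ≤ k
  else ∀ s, firstStar = some s → s ∈ L

theorem pvBoundary (items : List (Int × List (String × String))) (fs : Option Int) (star : Bool)
    (k : Int) (tl : List Int)
    (hsort : (k :: tl).Pairwise (· ≤ ·))
    (hmin : pvLab items k = "ORG_WITH_STAR_LABEL" → ∃ s, fs = some s ∧ s ≤ k)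
    (hlab : ∀ s, fs = some s → pvLab items s = "ORG_WITH_STAR_LABEL")
    (hinv : pvInv fs star (k :: tl)) :
    pvStartA items star k = pvIsStart items fs k := by
  cases star with
  | true =>
    simp only [pvInv, if_true] at hinv
    obtain ⟨s, hfs, hle⟩ := hinv
    have hsk : ¬ k < s := not_lt.mpr (hle k List.mem_cons_self)
    by_cases h1 : pvLab items k = "ORG_WITH_STAR_LABEL"
    · simp [pvStartA, pvIsStart, beq_iff_eq, h1]
    · by_cases h2 : pvLab items k = "ORG_LABEL"
      · simp [pvStartA, pvIsStart, beq_iff_eq, h1, h2, hfs, hsk]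
      · simp [pvStartA, pvIsStart, beq_eq_false_iff_ne.mpr h1, beq_eq_false_iff_ne.mpr h2]
  | false =>
    simp only [pvInv, if_false, Bool.false_eq_true] at hinv
    by_cases h1 : pvLab items k = "ORG_WITH_STAR_LABEL"
    · simp [pvStartA, pvIsStart, beq_iff_eq, h1]
    · by_cases h2 : pvLab items k = "ORG_LABEL"
      · simp only [pvStartA, pvIsStart, beq_iff_eq, h1, h2]
        cases hfs : fs with
        | none => simp
        | some s =>
          have hsl := hlab s hfs
          have hmem := hinv s hfs
          have hne : s ≠ k := fun he => h1 (he ▸ hsl)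
          have hst : s ∈ tl := by
            rcases List.mem_cons.mp hmem with h | h
            · exact absurd h hne
            · exact h
          have hks : k ≤ s := (List.pairwise_cons.mp hsort).1 s hst
          simp [lt_of_le_of_ne hks (Ne.symm hne)]
      · simp [pvStartA, pvIsStart, beq_eq_false_iff_ne.mpr h1, beq_eq_false_iff_ne.mpr h2]

theorem pvInv_step (items : List (Int × List (String × String))) (fs : Option Int) (star : Bool)
    (k : Int) (tl : List Int)
    (hsort : (k :: tl).Pairwise (· ≤ ·))
    (hmin : pvLab items k = "ORG_WITH_STAR_LABEL" → ∃ s, fs = some s ∧ s ≤ k)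
    (hlab : ∀ s, fs = some s → pvLab items s = "ORG_WITH_STAR_LABEL")
    (hinv : pvInv fs star (k :: tl)) :
    pvInv fs (pvNewStar items star k) tl := by
  by_cases h1 : pvLab items k = "ORG_WITH_STAR_LABEL"
  · obtain ⟨s, hfs, hsk⟩ := hmin h1
    simp only [pvInv, pvNewStar, h1, BEq.rfl, Bool.or_true, if_true]
    exact ⟨s, hfs, fun j hj => le_trans hsk ((List.pairwise_cons.mp hsort).1 j hj)⟩
  · have : pvNewStar items star k = star := by simp [pvNewStar, h1]
    rw [this]
    cases star with
    | true =>
      simp only [pvInv, if_true] at hinv ⊢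
      obtain ⟨s, hfs, hle⟩ := hinv
      exact ⟨s, hfs, fun j hj => hle j (List.mem_cons_of_mem _ hj)⟩
    | false =>
      simp only [pvInv, if_false, Bool.false_eq_true] at hinv ⊢
      intro s hfs
      have hne : s ≠ k := fun he => h1 (he ▸ hlab s hfs)
      rcases List.mem_cons.mp (hinv s hfs) with h | h
      · exact absurd h hne
      · exact h

theorem pvMain (items : List (Int × List (String × String))) (fs : Option Int)
    (hlab : ∀ s, fs = some s → pvLab items s = "ORG_WITH_STAR_LABEL") (L : List Int) :
    ∀ (cur : List (Int × List (String × String))) (star : Bool),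
      L.Pairwise (· ≤ ·) →
      (∀ k ∈ L, pvLab items k = "ORG_WITH_STAR_LABEL" → ∃ s, fs = some s ∧ s ≤ k) →
      pvInv fs star L →
      pvSplitCont items star cur L =
        (cur ++ (pvTakeBlock (pvIsStart items fs) L).1.map (fun j => (j, pvVal items j))) ::
          pvSplit items fs (pvTakeBlock (pvIsStart items fs) L).2 := by
  induction L with
  | nil => intro cur star _ _ _; simp [pvSplitCont, pvTakeBlock, pvSplit]
  | cons k tl ih =>
    intro cur star hsort hmin hinv
    have hb := pvBoundary items fs star k tl hsort (hmin k (List.mem_cons_self) ) hlab hinv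
    have hinv' := pvInv_step items fs star k tl hsort (hmin k (List.mem_cons_self)) hlab hinv
    have hsort' : tl.Pairwise (· ≤ ·) := (List.pairwise_cons.mp hsort).2
    have hmin' : ∀ j ∈ tl, pvLab items j = "ORG_WITH_STAR_LABEL" → ∃ s, fs = some s ∧ s ≤ j :=
      fun j hj => hmin j (List.mem_cons_of_mem _ hj)
    by_cases hst : pvIsStart items fs k = true
    · simp only [pvSplitCont, hb, hst, if_true, pvTakeBlock, List.map_nil, List.append_nil]
      rw [ih [(k, pvVal items k)] (pvNewStar items star k) hsort' hmin' hinv']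
      simp [pvSplit, pvTakeBlock, hst]
    · simp only [Bool.not_eq_true] at hst
      simp only [pvSplitCont, hb, hst, Bool.false_eq_true, if_false, pvTakeBlock]
      rw [ih (cur ++ [(k, pvVal items k)]) (pvNewStar items star k) hsort' hmin' hinv']
      simp

-- facts about stars.head? needed at the top level
theorem pvHead_lab (items : List (Int × List (String × String))) (ks : List Int) (s : Int)
    (h : (ks.filter (fun k => pvLab items k == "ORG_WITH_STAR_LABEL")).head? = some s) :
    pvLab items s = "ORG_WITH_STAR_LABEL" := by
  have hmem : s ∈ ks.filter (fun k => pvLab items k == "ORG_WITH_STAR_LABEL") :=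
    List.mem_of_mem_head? h
  simpa using (List.mem_filter.mp hmem).2

theorem pvHead_mem (items : List (Int × List (String × String))) (ks : List Int) (s : Int)
    (h : (ks.filter (fun k => pvLab items k == "ORG_WITH_STAR_LABEL")).head? = some s) :
    s ∈ ks :=
  (List.mem_filter.mp (List.mem_of_mem_head? h)).1

theorem pvHead_min (items : List (Int × List (String × String))) (ks : List Int)
    (hsort : ks.Pairwise (· ≤ ·)) (k : Int) (hk : k ∈ ks)
    (hlabk : pvLab items k = "ORG_WITH_STAR_LABEL") :
    ∃ s, (ks.filter (fun j => pvLab items j == "ORG_WITH_STAR_LABEL")).head? = some s ∧ s ≤ k := by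
  have hkf : k ∈ ks.filter (fun j => pvLab items j == "ORG_WITH_STAR_LABEL") :=
    List.mem_filter.mpr ⟨hk, by simp [hlabk]⟩
  have hpf : (ks.filter (fun j => pvLab items j == "ORG_WITH_STAR_LABEL")).Pairwise (· ≤ ·) :=
    List.Pairwise.filter _ hsort
  cases hf : ks.filter (fun j => pvLab items j == "ORG_WITH_STAR_LABEL") with
  | nil => rw [hf] at hkf; simp at hkf
  | cons s t =>
    refine ⟨s, by simp, ?_⟩
    rw [hf] at hkf hpf
    rcases List.mem_cons.mp hkf with he | ht
    · exact le_of_eq he.symm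
    · exact (List.pairwise_cons.mp hpf).1 k ht

-- ===== VERDICT (by name: the statement is the Claim_ definition above) =====
theorem split_by_org_headers_py_spec : Claim_equal_split_by_org_headers_py := by
  intro items _ _
  unfold Spec_split_by_org_headers_py split_by_org_headers_py split_by_org_headers_py_alt
  cases hks : PySem.List.sorted (items.map Prod.fst) (fun k => k) false with
  | nil => simp [pvSplit]
  | cons k0 rest =>
    have hsort : (k0 :: rest).Pairwise (· ≤ ·) := by
      have := PySem.List.sorted_pairwise (items.map Prod.fst) (fun k => k)
      rw [hks] at this; exact this
    set fs := ((k0 :: rest).filter (fun k => pvLab items k == "ORG_WITH_STAR_LABEL")).head? with hfs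
    have hlab : ∀ s, fs = some s → pvLab items s = "ORG_WITH_STAR_LABEL" :=
      fun s hs => pvHead_lab items (k0 :: rest) s (hfs ▸ hs)
    have hmin : ∀ j ∈ (k0 :: rest), pvLab items j = "ORG_WITH_STAR_LABEL" →
        ∃ s, fs = some s ∧ s ≤ j :=
      fun j hj hl => pvHead_min items (k0 :: rest) hsort j hj hl
    -- first iteration of A's loop, from the empty current
    have hstep0 : pvStepA items ([], ([], false)) k0 =
        ([], ([(k0, pvVal items k0)], pvLab items k0 == "ORG_WITH_STAR_LABEL")) := by
      rw [pvStepA_char]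
      by_cases h1 : pvLab items k0 = "ORG_WITH_STAR_LABEL" <;>
        simp [pvStartA, pvNewStar, h1]
    have hinv0 : pvInv fs (pvLab items k0 == "ORG_WITH_STAR_LABEL") rest := by
      by_cases h1 : pvLab items k0 = "ORG_WITH_STAR_LABEL"
      · obtain ⟨s, hfss, hsk⟩ := hmin k0 List.mem_cons_self h1
        simp only [pvInv, h1, BEq.rfl, if_true]
        exact ⟨s, hfss, fun j hj => le_trans hsk ((List.pairwise_cons.mp hsort).1 j hj)⟩
      · simp only [pvInv, h1, beq_iff_eq, if_neg]
        intro s hfss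
        have hne : s ≠ k0 := fun he => h1 (he ▸ hlab s hfss)
        rcases List.mem_cons.mp (pvHead_mem items (k0 :: rest) s (hfs ▸ hfss)) with he | ht
        · exact absurd he hne
        · exact ht
    have hA := pvFoldA_char items rest [] [(k0, pvVal items k0)]
      (pvLab items k0 == "ORG_WITH_STAR_LABEL") (by simp)
    have hB := pvMain items fs hlab rest [(k0, pvVal items k0)]
      (pvLab items k0 == "ORG_WITH_STAR_LABEL") (List.pairwise_cons.mp hsort).2
      (fun j hj => hmin j (List.mem_cons_of_mem _ hj)) hinv0
    simp only [List.foldl_cons, hstep0] at *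
    rw [hA, hB]
    simp [pvSplit, ← hfs]
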